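-- pv_equiv track=rewrite | github.com/lassemand/aoc-2023 | 7/main.py | exercise_1
-- ===== SOURCE A (Python) =====
-- import functools
-- from collections import Counter
--
-- def find_combinations(hand):
--     counts = Counter(hand)
--     duplicates = {count: [] for count in set(counts.values())}
--     for card, count in counts.items():
--         duplicates[count].append(card)
--     return duplicates
--
-- def exercise_1(pairs):
--     values = {'A': 12, 'K': 11, 'Q': 10, 'J': 9, 'T': 8, '9': 7, '8': 6, '7': 5, '6': 4, '5': 3, '4': 2, '3': 1,
--               '2': 0}
--
--     def count_score(pairs, rules):
--         current_rank = len(pairs)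
--         result = 0
--         for rule in rules:
--             cards = sort_hands(rule['bucket'])
--             for card in cards:
--                 result += pairs[card] * current_rank
--                 current_rank -= 1
--         return result
--
--     def card_value(card, index):
--         """Assigns a numeric value to each card for sorting."""
--
--         def projection(index):
--             if index == 4:
--                 return 0  # [0-12]
--             elif index == 3:
--                 return 13  # [13-25]
--             elif index == 2:
--                 return 38  # [38-50]
--             elif index == 1:
--                 return 88  # [88-100]
--             else:
--                 return 188  # [188-200]
--
--         return values[card] + projection(index)
--
--     def sort_hand(hand):
--         """Converts a hand into a sorted list of card values."""
--         return sorted([card_value(card, index) for index, card in enumerate(hand)], reverse=True)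
--
--     def sort_hands(hands):
--         """Sorts a list of hands based on card values."""
--         return sorted(hands, key=sort_hand, reverse=True)
--
--     rules = [
--         {
--             'rule': [[5, 1]], 'bucket': [],
--         }, {
--             'rule': [[4, 1]], 'bucket': [],
--         }, {
--             'rule': [[3, 1], [2, 1]], 'bucket': [],
--         }, {
--             'rule': [[3, 1]], 'bucket': [],
--         }, {
--             'rule': [[2, 2]], 'bucket': [],
--         }, {
--             'rule': [[2, 1]], 'bucket': [],
--         }, {
--             'rule': [[1, 1]], 'bucket': []
--         }
--     ]
--     for card in pairs:
--         combinations = find_combinations(card)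
--         for rule in rules:
--             results = [True if size[0] in combinations and len(combinations[size[0]]) == size[1] else False for size in
--                        rule['rule']]
--             if functools.reduce(lambda a, b: a and b, results):
--                 rule['bucket'].append(card)
--                 break
--     return count_score(pairs, rules)
-- ===== SOURCE B (Python) =====
-- from collections import Counter
--
-- def exercise_1(pairs):
--     values = {'A': 12, 'K': 11, 'Q': 10, 'J': 9, 'T': 8, '9': 7, '8': 6, '7': 5,
--               '6': 4, '5': 3, '4': 2, '3': 1, '2': 0}
--     rules = [[(5, 1)], [(4, 1)], [(3, 1), (2, 1)], [(3, 1)], [(2, 2)], [(2, 1)], [(1, 1)]]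
--
--     def type_index(hand):
--         sizes = Counter(Counter(hand).values())
--         for i, rule in enumerate(rules):
--             if all(sizes[k] == m for k, m in rule):
--                 return i
--         return None
--
--     def strength(hand):
--         bases = (188, 88, 38, 13, 0)
--         return sorted((values[c] + (bases[i] if i < 5 else 188) for i, c in enumerate(hand)),
--                       reverse=True)
--
--     n = len(pairs)
--     matched = [(t, h) for h in pairs if (t := type_index(h)) is not None]
--     matched.sort(key=lambda p: [6 - p[0]] + strength(p[1]), reverse=True)
--     return sum(pairs[h] * (n - j) for j, (t, h) in enumerate(matched))
-- ===== Notes on version B (the rewrite author's own statement) =====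
-- stated objective: simpler
-- what changed: Replaces A's seven mutable rule buckets (partition pass, then seven per-bucket reverse sorts walked with a hand-decremented rank counter) by a direct classifier returning the rule index and ONE stable sort of the matched hands on the composite key [6 - type_index] + strength, summing bid * (n - position) with enumerate.
import Mathlib
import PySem

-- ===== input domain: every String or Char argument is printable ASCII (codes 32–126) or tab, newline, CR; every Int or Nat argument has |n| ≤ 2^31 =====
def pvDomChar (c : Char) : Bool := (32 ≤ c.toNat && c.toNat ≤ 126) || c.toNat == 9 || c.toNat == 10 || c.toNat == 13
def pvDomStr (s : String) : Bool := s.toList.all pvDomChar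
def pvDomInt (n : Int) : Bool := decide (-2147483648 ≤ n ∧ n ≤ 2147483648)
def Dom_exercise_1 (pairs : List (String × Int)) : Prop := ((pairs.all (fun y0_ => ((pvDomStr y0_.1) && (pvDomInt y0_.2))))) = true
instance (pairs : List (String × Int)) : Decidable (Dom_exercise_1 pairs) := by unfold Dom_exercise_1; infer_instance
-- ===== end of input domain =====

-- B replaces A's seven mutable rule buckets and seven per-bucket reverse sorts (walked with a
-- decrementing rank counter) by a rule-index classifier, ONE stable reverse sort of the matched
-- hands on the composite key [6 - type_index] ++ strength, and a sum of bid * (n - position).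
-- Objective: simpler. Pairs is a Python dict: duplicate keys in the list collapse (last value,
-- first position), as PySem.Dict does.


-- ===== PORT A =====
def pvAValues : PySem.Dict Char Int := PySem.Dict.ofList
  [('A',12),('K',11),('Q',10),('J',9),('T',8),('9',7),('8',6),('7',5),('6',4),('5',3),('4',2),('3',1),('2',0)]

def pvAFindCombinations (hand : List Char) : PySem.Dict Int (List Char) :=
  let counts := PySem.Dict.counter hand
  let duplicates : PySem.Dict Int (List Char) :=
    (PySem.Set.ofList counts.values).foldl (fun d count => d.insert count []) PySem.Dict.empty
  counts.items.foldl (fun d p => d.modify p.2 [] (fun l => l ++ [p.1])) duplicates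

def pvAProjection (index : Int) : Int :=
  if index == 4 then 0 else if index == 3 then 13 else if index == 2 then 38
  else if index == 1 then 88 else 188

-- values[card] + projection(index); the getD default is unreachable under Pre_exercise_1
def pvACardValue (card : Char) (index : Int) : Int := pvAValues.getD card 0 + pvAProjection index

def pvASortHand (hand : String) : List Int :=
  PySem.List.sorted ((PySem.List.enumerate hand.toList 0).map (fun p => pvACardValue p.2 p.1)) (fun x => x) true

def pvASortHands (hands : List String) : List String := PySem.List.sorted hands pvASortHand true

-- results = [cond for size in rule]; functools.reduce(and) over the (always nonempty) list
def pvAMatches (combinations : PySem.Dict Int (List Char)) (rule : List (Int × Int)) : Bool :=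
  (rule.map (fun size => combinations.contains size.1 && (((combinations.getD size.1 []).length : Int) == size.2))).foldl
    (fun a b => a && b) true

-- the rules list with its seven buckets
def pvAMkRules (b0 b1 b2 b3 b4 b5 b6 : List String) : List (List (Int × Int) × List String) :=
  [([(5,1)], b0), ([(4,1)], b1), ([(3,1),(2,1)], b2), ([(3,1)], b3), ([(2,2)], b4), ([(2,1)], b5), ([(1,1)], b6)]

-- inner 'for rule in rules: if match: bucket.append(card); break'
def pvAPlace (rules : List (List (Int × Int) × List String)) (combinations : PySem.Dict Int (List Char))
    (card : String) : List (List (Int × Int) × List String) :=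
  match rules with
  | [] => []
  | (rule, bucket) :: rest =>
      if pvAMatches combinations rule then (rule, bucket ++ [card]) :: rest
      else (rule, bucket) :: pvAPlace rest combinations card

def pvACountScore (pairs : PySem.Dict String Int) (rules : List (List (Int × Int) × List String)) : Int :=
  (rules.foldl
    (fun st r =>
      (pvASortHands r.2).foldl (fun st2 card => (st2.1 - 1, st2.2 + pairs.getD card 0 * st2.1)) st)
    ((pairs.size : Int), 0)).2

def exercise_1 (pairs : List (String × Int)) : Int :=
  let d := PySem.Dict.ofList pairs
  let rules := d.keys.foldl (fun rs card => pvAPlace rs (pvAFindCombinations card.toList) card)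
    (pvAMkRules [] [] [] [] [] [] [])
  pvACountScore d rules

-- ===== PORT B =====
def pvBValues : PySem.Dict Char Int := PySem.Dict.ofList
  [('A',12),('K',11),('Q',10),('J',9),('T',8),('9',7),('8',6),('7',5),('6',4),('5',3),('4',2),('3',1),('2',0)]

def pvBRules : List (List (Int × Int)) := [[(5,1)],[(4,1)],[(3,1),(2,1)],[(3,1)],[(2,2)],[(2,1)],[(1,1)]]

-- 'for i, rule in enumerate(rules): if all(...): return i' / 'return None'
def pvBFirstMatch (sizes : PySem.Dict Int Int) : List (List (Int × Int)) → Int → Option Int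
  | [], _ => none
  | rule :: rest, i =>
      if rule.all (fun km => sizes.getD km.1 0 == km.2) then some i else pvBFirstMatch sizes rest (i + 1)

def pvBTypeIndex (hand : List Char) : Option Int :=
  pvBFirstMatch (PySem.Dict.counter (PySem.Dict.counter hand).values) pvBRules 0

def pvBBases : List Int := [188, 88, 38, 13, 0]

def pvBStrength (hand : List Char) : List Int :=
  PySem.List.sorted
    ((PySem.List.enumerate hand 0).map
      (fun p => pvBValues.getD p.2 0 + (if p.1 < 5 then PySem.List.pyGetD pvBBases p.1 0 else 188)))
    (fun x => x) true

def exercise_1_alt (pairs : List (String × Int)) : Int :=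
  let d := PySem.Dict.ofList pairs
  let n : Int := (d.size : Int)
  let matched := d.keys.filterMap (fun h => (pvBTypeIndex h.toList).map (fun t => (t, h)))
  let ms := PySem.List.sorted matched (fun p => (6 - p.1) :: pvBStrength p.2.toList) true
  ((PySem.List.enumerate ms 0).map (fun q => d.getD q.2.2 0 * (n - q.1))).sum


-- ===== PRECONDITION & SPEC =====
-- number of distinct cards occurring exactly k times in the hand
def pvPreSizes (cs : List Char) (k : Int) : Int :=
  (((PySem.List.dedup cs).filter (fun c => ((cs.count c : Int) == k))).length : Int)

-- the hand matches one of A's seven rules (the union of the seven rule conjunctions)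
def pvPreMatched (cs : List Char) : Bool :=
  pvPreSizes cs 5 == 1 || pvPreSizes cs 4 == 1 || pvPreSizes cs 3 == 1 ||
  pvPreSizes cs 2 == 1 || pvPreSizes cs 2 == 2 || pvPreSizes cs 1 == 1

-- Pre_ excludes exactly the inputs on which Python A raises KeyError: a hand that matches one of
-- the seven rules but contains a character that is not one of the thirteen cards (values[card]
-- is evaluated only on bucketed hands). B raises on exactly the same inputs; the ports' getD 0
-- default is unreachable under Pre_.
def Pre_exercise_1 (pairs : List (String × Int)) : Prop :=
  (pairs.all (fun p => !(pvPreMatched p.1.toList) ||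
    p.1.toList.all (fun c => ("AKQJT98765432".toList).contains c))) = true

instance (pairs : List (String × Int)) : Decidable (Pre_exercise_1 pairs) := by
  unfold Pre_exercise_1; infer_instance

def pvWitness_exercise_1 : (List (String × Int)) := [("AAAAA", 10), ("KKQQ2", 5), ("xy*z", 7)]

def Spec_exercise_1 (pairs : List (String × Int)) (out : Int) : Prop := out = exercise_1_alt pairs
instance (pairs : List (String × Int)) (out : Int) : Decidable (Spec_exercise_1 pairs out) := by
  unfold Spec_exercise_1; infer_instance

-- ===== CLAIM (what is proved, stated in full; the proofs are below) =====
def Claim_equal_exercise_1 : Prop := ∀ (pairs : List (String × Int)), Dom_exercise_1 pairs → Pre_exercise_1 pairs → Spec_exercise_1 pairs (exercise_1 pairs)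

-- ===== LEMMAS AND PROOFS =====

-- A's first-matching-rule index, extracted from pvAPlace
def pvClsA (c : PySem.Dict Int (List Char)) : Option Int :=
  if pvAMatches c [(5,1)] then some 0 else if pvAMatches c [(4,1)] then some 1
  else if pvAMatches c [(3,1),(2,1)] then some 2 else if pvAMatches c [(3,1)] then some 3
  else if pvAMatches c [(2,2)] then some 4 else if pvAMatches c [(2,1)] then some 5
  else if pvAMatches c [(1,1)] then some 6 else none

theorem pvDups_getD (vs : List Int) :
    ∀ (d : PySem.Dict Int (List Char)), (∀ k, d.getD k [] = []) →
    ∀ k, (vs.foldl (fun d v => d.insert v []) d).getD k [] = [] := by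
  induction vs with
  | nil => intro d h k; exact h k
  | cons v t ih =>
    intro d h k
    rw [List.foldl_cons]
    refine ih _ (fun k' => ?_) k
    rw [PySem.Dict.getD_insert]
    split <;> simp [h]

theorem pvCombos_getD (cs : List Char) (k : Int) :
    (pvAFindCombinations cs).getD k [] =
      (((PySem.Dict.counter cs).items.filter (fun p => p.2 == k)).map (fun p => p.1)) := by
  simp only [pvAFindCombinations]
  have h1 : ((PySem.Dict.counter cs).items.foldl
      (fun d p => d.modify p.2 [] (fun l => l ++ [p.1]))
      ((PySem.Set.ofList (PySem.Dict.counter cs).values).foldl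
        (fun d count => d.insert count []) PySem.Dict.empty)) =
      (((PySem.Dict.counter cs).items.map (fun p => (p.2, p.1))).foldl
      (fun d p => d.modify p.1 [] (fun l => l ++ [p.2]))
      ((PySem.Set.ofList (PySem.Dict.counter cs).values).foldl
        (fun d count => d.insert count []) PySem.Dict.empty)) := by
    rw [List.foldl_map]
  rw [h1, PySem.Dict.getD_foldl_modify_append]
  rw [pvDups_getD _ _ (fun k' => PySem.Dict.getD_empty k' [])]
  rw [List.filter_map]
  rw [List.map_map]
  rfl

theorem pvFoldModify_contains (l : List (Char × Int)) (k : Int) :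
    ∀ (d : PySem.Dict Int (List Char)),
    ((l.foldl (fun d p => d.modify p.2 [] (fun l => l ++ [p.1])) d).contains k) =
      (d.contains k || l.any (fun p => k == p.2)) := by
  induction l with
  | nil => intro d; simp
  | cons p t ih =>
    intro d
    rw [List.foldl_cons, ih, PySem.Dict.contains_modify]
    simp [Bool.or_assoc, Bool.or_comm, Bool.or_left_comm]

theorem pvFoldInsert_contains (vs : List Int) (k : Int) :
    ∀ (d : PySem.Dict Int (List Char)),
    ((vs.foldl (fun d v => d.insert v []) d).contains k) = (d.contains k || vs.any (fun v => k == v)) := by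
  induction vs with
  | nil => intro d; simp
  | cons v t ih =>
    intro d
    rw [List.foldl_cons, ih, PySem.Dict.contains_insert]
    simp [Bool.or_assoc, Bool.or_comm, Bool.or_left_comm]

theorem pvCombos_contains (cs : List Char) (k : Int) :
    ((pvAFindCombinations cs).contains k) = ((PySem.Dict.counter cs).values.contains k) := by
  simp only [pvAFindCombinations]
  rw [pvFoldModify_contains, pvFoldInsert_contains]
  simp only [PySem.Dict.contains_empty, Bool.false_or]
  rw [Bool.eq_iff_iff]
  have hv : (PySem.Dict.counter cs).values = (PySem.Dict.counter cs).items.map (fun p => p.2) := rfl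
  simp only [Bool.or_eq_true, List.any_eq_true, PySem.Set.mem_ofList, List.contains_iff_mem, hv,
    List.mem_map, beq_iff_eq]
  constructor
  · rintro (⟨v, ⟨p, hp, rfl⟩, rfl⟩ | ⟨p, hp, rfl⟩) <;> exact ⟨p, hp, rfl⟩
  · rintro ⟨p, hp, rfl⟩
    exact Or.inl ⟨p.2, ⟨p, hp, rfl⟩, rfl⟩

-- count of distinct cards with multiplicity k, on both sides
theorem pvPred_eq (cs : List Char) (k m : Int) (hm : m = 1 ∨ m = 2) :
    ((pvAFindCombinations cs).contains k && ((((pvAFindCombinations cs).getD k []).length : Int) == m))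
    = ((PySem.Dict.counter ((PySem.Dict.counter cs).values)).getD k 0 == m) := by
  rw [pvCombos_contains, pvCombos_getD, PySem.Dict.getD_counter]
  rw [List.length_map, ← List.countP_eq_length_filter]
  have hcnt : List.count k ((PySem.Dict.counter cs).values) =
      List.countP (fun p => p.2 == k) (PySem.Dict.counter cs).items := by
    have hv : (PySem.Dict.counter cs).values = (PySem.Dict.counter cs).items.map (fun p => p.2) := rfl
    rw [hv, List.count_eq_countP, List.countP_map]
    rfl
  rw [← hcnt]
  by_cases hmem : k ∈ (PySem.Dict.counter cs).values
  · have : ((PySem.Dict.counter cs).values.contains k) = true := by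
      simpa [List.contains_iff_mem] using hmem
    rw [this, Bool.true_and]
  · have h0 : List.count k ((PySem.Dict.counter cs).values) = 0 :=
      List.count_eq_zero_of_not_mem hmem
    have : ((PySem.Dict.counter cs).values.contains k) = false := by
      simp [List.contains_iff_mem, hmem]
    rw [this, Bool.false_and, h0]
    rcases hm with rfl | rfl <;> simp

theorem pvCls_eq (cs : List Char) : pvBTypeIndex cs = pvClsA (pvAFindCombinations cs) := by
  have e51 := pvPred_eq cs 5 1 (Or.inl rfl)
  have e41 := pvPred_eq cs 4 1 (Or.inl rfl)
  have e31 := pvPred_eq cs 3 1 (Or.inl rfl)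
  have e21 := pvPred_eq cs 2 1 (Or.inl rfl)
  have e22 := pvPred_eq cs 2 2 (Or.inr rfl)
  have e11 := pvPred_eq cs 1 1 (Or.inl rfl)
  unfold pvBTypeIndex pvBRules pvClsA pvAMatches
  simp only [pvBFirstMatch, List.all_cons, List.all_nil, List.map_cons, List.map_nil,
    List.foldl_cons, List.foldl_nil, Bool.true_and, Bool.and_true]
  rw [← e51, ← e41, ← e31, ← e21, ← e22, ← e11]
  norm_num

theorem pvCls_bound (cs : List Char) (t : Int) (h : pvBTypeIndex cs = some t) :
    0 ≤ t ∧ t < 7 := by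
  rw [pvCls_eq] at h
  unfold pvClsA at h
  split_ifs at h <;> simp_all <;> omega

theorem pvPlace_mk (c : PySem.Dict Int (List Char)) (h : String) (b0 b1 b2 b3 b4 b5 b6 : List String) :
    pvAPlace (pvAMkRules b0 b1 b2 b3 b4 b5 b6) c h =
    pvAMkRules (b0 ++ if pvClsA c == some 0 then [h] else [])
               (b1 ++ if pvClsA c == some 1 then [h] else [])
               (b2 ++ if pvClsA c == some 2 then [h] else [])
               (b3 ++ if pvClsA c == some 3 then [h] else [])
               (b4 ++ if pvClsA c == some 4 then [h] else [])
               (b5 ++ if pvClsA c == some 5 then [h] else [])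
               (b6 ++ if pvClsA c == some 6 then [h] else []) := by
  by_cases m0 : pvAMatches c [(5,1)] <;>
    by_cases m1 : pvAMatches c [(4,1)] <;>
    by_cases m2 : pvAMatches c [(3,1),(2,1)] <;>
    by_cases m3 : pvAMatches c [(3,1)] <;>
    by_cases m4 : pvAMatches c [(2,2)] <;>
    by_cases m5 : pvAMatches c [(2,1)] <;>
    by_cases m6 : pvAMatches c [(1,1)] <;>
    simp [pvAMkRules, pvAPlace, pvClsA, m0, m1, m2, m3, m4, m5, m6]

theorem pvLoop_mk : ∀ (hs : List String) (b0 b1 b2 b3 b4 b5 b6 : List String),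
    hs.foldl (fun rs card => pvAPlace rs (pvAFindCombinations card.toList) card)
      (pvAMkRules b0 b1 b2 b3 b4 b5 b6) =
    pvAMkRules (b0 ++ hs.filter (fun h => pvClsA (pvAFindCombinations h.toList) == some 0))
               (b1 ++ hs.filter (fun h => pvClsA (pvAFindCombinations h.toList) == some 1))
               (b2 ++ hs.filter (fun h => pvClsA (pvAFindCombinations h.toList) == some 2))
               (b3 ++ hs.filter (fun h => pvClsA (pvAFindCombinations h.toList) == some 3))
               (b4 ++ hs.filter (fun h => pvClsA (pvAFindCombinations h.toList) == some 4))
               (b5 ++ hs.filter (fun h => pvClsA (pvAFindCombinations h.toList) == some 5))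
               (b6 ++ hs.filter (fun h => pvClsA (pvAFindCombinations h.toList) == some 6)) := by
  intro hs
  induction hs with
  | nil => intro b0 b1 b2 b3 b4 b5 b6; simp
  | cons h t ih =>
    intro b0 b1 b2 b3 b4 b5 b6
    rw [List.foldl_cons, pvPlace_mk, ih]
    simp only [List.filter_cons]
    split_ifs <;> simp_all [List.append_assoc]

theorem pvScore_fold (d : PySem.Dict String Int) :
    ∀ (L : List String) (r s t : Int),
    (L.foldl (fun st2 card => (st2.1 - 1, st2.2 + d.getD card 0 * st2.1)) (r, s)) =
    (r - L.length, s + ((PySem.List.enumerate L t).map (fun q => d.getD q.2 0 * (r + t - q.1))).sum) := by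
  intro L
  induction L with
  | nil => intro r s t; simp [PySem.List.enumerate]
  | cons c L ih =>
    intro r s t
    rw [List.foldl_cons, ih (r - 1) _ (t + 1), PySem.List.enumerate_cons]
    simp only [List.map_cons, List.sum_cons, Prod.mk.injEq]
    have hmc : ∀ q : Int × String, d.getD q.2 0 * (r - 1 + (t + 1) - q.1) = d.getD q.2 0 * (r + t - q.1) := by
      intro q; ring
    rw [List.map_congr_left (fun q _ => hmc q)]
    refine ⟨by simp only [List.length_cons]; push_cast; ring, by ring⟩

theorem pvStrength_eq (h : String) : pvBStrength h.toList = pvASortHand h := by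
  unfold pvBStrength pvASortHand
  congr 1
  refine List.map_congr_left (fun p hp => ?_)
  rw [PySem.List.mem_enumerate_iff] at hp
  obtain ⟨k, hk, rfl⟩ := hp
  have hk0 : (0 : Int) ≤ 0 + (k : Int) := by positivity
  have hval : pvBValues = pvAValues := rfl
  rw [hval]
  unfold pvACardValue pvAProjection
  simp only [beq_iff_eq]
  have hi : (0 : Int) + (k : Int) = (k : Int) := by ring
  rw [hi]
  by_cases h4 : (k : Int) = 4
  · rw [h4]; norm_num [PySem.List.pyGetD, PySem.List.pyIdx?, pvBBases]; try decide
  · by_cases h3 : (k : Int) = 3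
    · rw [h3]; norm_num [PySem.List.pyGetD, PySem.List.pyIdx?, pvBBases]; try decide
    · by_cases h2 : (k : Int) = 2
      · rw [h2]; norm_num [PySem.List.pyGetD, PySem.List.pyIdx?, pvBBases]; try decide
      · by_cases h1 : (k : Int) = 1
        · rw [h1]; norm_num [PySem.List.pyGetD, PySem.List.pyIdx?, pvBBases]; try decide
        · by_cases h5 : (k : Int) < 5
          · have h0 : (k : Int) = 0 := by omega
            rw [h0]; norm_num [PySem.List.pyGetD, PySem.List.pyIdx?, pvBBases]
          · simp only [if_neg h4, if_neg h3, if_neg h2, if_neg h1, if_neg h5]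

theorem pvMatched_filter (i : Int) : ∀ (ks : List String),
    (ks.filterMap (fun h => (pvBTypeIndex h.toList).map (fun t => (t, h)))).filter
      (fun p => p.1 == i) =
    (ks.filter (fun h => pvBTypeIndex h.toList == some i)).map (fun h => (i, h)) := by
  intro ks
  induction ks with
  | nil => simp
  | cons h t ih =>
    rw [List.filterMap_cons, List.filter_cons]
    cases hc : pvBTypeIndex h.toList with
    | none => simp [hc, ih]
    | some v =>
      by_cases hv : v = i
      · subst hv; simp [hc, ih]
      · simp only [hc, Option.map_some, List.filter_cons]
        have : ¬ ((v, h).1 == i) = true := by simpa using hv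
        simp [this, ih, hv]

theorem pvPerm_parts : ∀ (l : List (Int × String)), (∀ p ∈ l, 0 ≤ p.1 ∧ p.1 < 7) →
    (l.filter (fun p => p.1 == 0) ++ l.filter (fun p => p.1 == 1) ++ l.filter (fun p => p.1 == 2) ++
     l.filter (fun p => p.1 == 3) ++ l.filter (fun p => p.1 == 4) ++ l.filter (fun p => p.1 == 5) ++
     l.filter (fun p => p.1 == 6)).Perm l := by
  intro l hb
  rw [List.perm_iff_count]
  intro x
  simp only [List.count_append]
  by_cases hx : x ∈ l
  · obtain ⟨h0, h7⟩ := hb x hx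
    have hcf : ∀ (i : Int), List.count x (l.filter (fun p => p.1 == i)) =
        if x.1 = i then List.count x l else 0 := by
      intro i
      by_cases hxi : x.1 = i
      · rw [if_pos hxi, List.count_filter (by simpa using hxi)]
      · rw [if_neg hxi, List.count_eq_zero_of_not_mem]
        intro hmem
        rcases List.mem_filter.mp hmem with ⟨_, hp⟩
        exact hxi (by simpa using hp)
    rw [hcf 0, hcf 1, hcf 2, hcf 3, hcf 4, hcf 5, hcf 6]
    split_ifs <;> omega
  · have h0 : List.count x l = 0 := List.count_eq_zero_of_not_mem hx
    have hcf : ∀ (i : Int), List.count x (l.filter (fun p => p.1 == i)) = 0 := by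
      intro i
      refine List.count_eq_zero_of_not_mem (fun hmem => hx ?_)
      exact (List.mem_filter.mp hmem).1
    rw [hcf 0, hcf 1, hcf 2, hcf 3, hcf 4, hcf 5, hcf 6, h0]

-- generic insertion-sort lemmas about PySem.List.sorted (stability / map / key-congruence)
theorem pvInsertBy_stable {β κ : Type} [LT κ] [DecidableLT κ]
    (htr : ∀ {u v w : κ}, u < v → v < w → u < w)
    (htri : ∀ u v : κ, ¬ v < u → u < v ∨ u = v)
    (key : β → κ) (P : β → β → Prop) (x : β) :
    ∀ (acc : List β),
    acc.Pairwise (fun a b => key b < key a ∨ (key a = key b ∧ P a b)) →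
    (∀ a ∈ acc, P a x) →
    (PySem.List.insertBy (fun a b => decide (key b < key a)) x acc).Pairwise
      (fun a b => key b < key a ∨ (key a = key b ∧ P a b)) := by
  intro acc
  induction acc with
  | nil => intro _ _; simp [PySem.List.insertBy]
  | cons y t ih =>
    intro hpw hP
    rw [List.pairwise_cons] at hpw
    obtain ⟨hyt, hpt⟩ := hpw
    by_cases hxy : key y < key x
    · have : PySem.List.insertBy (fun a b => decide (key b < key a)) x (y :: t) = x :: y :: t := by
        simp [PySem.List.insertBy, hxy]
      rw [this, List.pairwise_cons]
      refine ⟨?_, List.pairwise_cons.mpr ⟨hyt, hpt⟩⟩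
      intro b hb
      rcases List.mem_cons.mp hb with hb | hb
      · subst hb; exact Or.inl hxy
      · rcases hyt b hb with h | ⟨heq, _⟩
        · exact Or.inl (htr h hxy)
        · exact Or.inl (heq ▸ hxy)
    · have : PySem.List.insertBy (fun a b => decide (key b < key a)) x (y :: t) =
          y :: PySem.List.insertBy (fun a b => decide (key b < key a)) x t := by
        simp [PySem.List.insertBy, hxy]
      rw [this, List.pairwise_cons]
      constructor
      · intro b hb
        rcases (PySem.List.mem_insertBy _ _ _ _).mp hb with hb | hb
        · subst hb
          rcases htri _ _ hxy with h | h
          · exact Or.inl h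
          · exact Or.inr ⟨h.symm, hP y (by simp)⟩
        · exact hyt b hb
      · exact ih hpt (fun a ha => hP a (by simp [ha]))

theorem pvSorted_rev_stable {β κ : Type} [LT κ] [DecidableLT κ]
    (htr : ∀ {u v w : κ}, u < v → v < w → u < w)
    (htri : ∀ u v : κ, ¬ v < u → u < v ∨ u = v)
    (key : β → κ) (P : β → β → Prop)
    (l : List β) (hP : l.Pairwise P) :
    (PySem.List.sorted l key true).Pairwise
      (fun a b => key b < key a ∨ (key a = key b ∧ P a b)) := by
  rw [PySem.List.sorted_rev_eq_foldl_insertBy]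
  suffices h : ∀ (l' acc : List β),
      acc.Pairwise (fun a b => key b < key a ∨ (key a = key b ∧ P a b)) →
      (∀ a ∈ acc, ∀ b ∈ l', P a b) → l'.Pairwise P →
      (l'.foldl (fun acc x => PySem.List.insertBy (fun a b => decide (key b < key a)) x acc) acc).Pairwise
        (fun a b => key b < key a ∨ (key a = key b ∧ P a b)) by
    exact h l [] (by simp) (by simp) hP
  intro l'
  induction l' with
  | nil => intro acc h _ _; simpa using h
  | cons x t ih =>
    intro acc hacc hcross hpw
    rw [List.pairwise_cons] at hpw
    rw [List.foldl_cons]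
    refine ih _ (pvInsertBy_stable htr htri key P x acc hacc (fun a ha => hcross a ha x (by simp))) ?_ hpw.2
    intro a ha b hb
    rcases (PySem.List.mem_insertBy _ _ _ _).mp ha with ha | ha
    · subst ha; exact hpw.1 b hb
    · exact hcross a ha b (by simp [hb])

theorem pvInsertBy_map {α β : Type} (f : α → β) (bf : β → β → Bool) (x : α) :
    ∀ (l : List α), PySem.List.insertBy bf (f x) (l.map f) =
      (PySem.List.insertBy (fun a b => bf (f a) (f b)) x l).map f := by
  intro l
  induction l with
  | nil => simp [PySem.List.insertBy]
  | cons y t ih =>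
    by_cases h : bf (f x) (f y)
    · simp [PySem.List.insertBy, h]
    · simp [PySem.List.insertBy, h, ih]

theorem pvSorted_map {α β κ : Type} [LT κ] [DecidableLT κ] (f : α → β) (key : β → κ) (l : List α) :
    PySem.List.sorted (l.map f) key true = (PySem.List.sorted l (fun a => key (f a)) true).map f := by
  rw [PySem.List.sorted_rev_eq_foldl_insertBy, PySem.List.sorted_rev_eq_foldl_insertBy,
    List.foldl_map]
  suffices h : ∀ (l' : List α) (acc : List α),
      l'.foldl (fun acc x => PySem.List.insertBy (fun a b => decide (key b < key a)) (f x) acc) (acc.map f) =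
      (l'.foldl (fun acc x =>
        PySem.List.insertBy (fun a b => decide (key (f b) < key (f a))) x acc) acc).map f by
    simpa using h l []
  intro l'
  induction l' with
  | nil => intro acc; simp
  | cons x t ih =>
    intro acc
    rw [List.foldl_cons, List.foldl_cons, pvInsertBy_map f _ x acc]
    exact ih _

theorem pvInsertBy_congr {α : Type} (b1 b2 : α → α → Bool) (x : α)
    (l : List α) (h : ∀ y ∈ l, b1 x y = b2 x y) :
    PySem.List.insertBy b1 x l = PySem.List.insertBy b2 x l := by
  induction l with
  | nil => simp [PySem.List.insertBy]
  | cons y t ih =>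
    have hy : b1 x y = b2 x y := h y (by simp)
    by_cases hb : b1 x y
    · simp [PySem.List.insertBy, hb, hy ▸ hb]
    · have hb2 : ¬ b2 x y = true := by rw [← hy]; exact hb
      simp [PySem.List.insertBy, hb, hb2]
      exact ih (fun y hy' => h y (by simp [hy']))

theorem pvSorted_congr {α κ1 κ2 : Type} [LT κ1] [DecidableLT κ1] [LT κ2] [DecidableLT κ2]
    (k1 : α → κ1) (k2 : α → κ2) (l : List α)
    (h : ∀ a ∈ l, ∀ b ∈ l, (k1 a < k1 b ↔ k2 a < k2 b)) :
    PySem.List.sorted l k1 true = PySem.List.sorted l k2 true := by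
  rw [PySem.List.sorted_rev_eq_foldl_insertBy, PySem.List.sorted_rev_eq_foldl_insertBy]
  suffices hs : ∀ (l' acc : List α), (∀ y ∈ acc, y ∈ l) → (∀ y ∈ l', y ∈ l) →
      l'.foldl (fun acc x => PySem.List.insertBy (fun a b => decide (k1 b < k1 a)) x acc) acc =
      l'.foldl (fun acc x => PySem.List.insertBy (fun a b => decide (k2 b < k2 a)) x acc) acc by
    exact hs l [] (by simp) (fun y hy => hy)
  intro l'
  induction l' with
  | nil => intro acc _ _; simp
  | cons x t ih =>
    intro acc hacc hl
    rw [List.foldl_cons, List.foldl_cons]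
    have hx : x ∈ l := hl x (by simp)
    have heq : PySem.List.insertBy (fun a b => decide (k1 b < k1 a)) x acc =
        PySem.List.insertBy (fun a b => decide (k2 b < k2 a)) x acc := by
      refine pvInsertBy_congr _ _ x acc (fun y hy => ?_)
      have := h y (hacc y hy) x hx
      simp [this]
    rw [heq]
    refine ih _ (fun y hy => ?_) (fun y hy => hl y (by simp [hy]))
    rcases (PySem.List.mem_insertBy _ _ _ _).mp hy with hy | hy
    · exact hy ▸ hx
    · exact hacc y hy

theorem pvEnum_map {α β : Type} (f : α → β) :
    ∀ (l : List α) (s : Int),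
    PySem.List.enumerate (l.map f) s = (PySem.List.enumerate l s).map (fun q => (q.1, f q.2)) := by
  intro l
  induction l with
  | nil => intro s; simp
  | cons x t ih => intro s; simp [PySem.List.enumerate_cons, ih]

theorem pvPairwise_idxOf {α : Type} [BEq α] [LawfulBEq α] :
    ∀ (l : List α), l.Nodup → l.Pairwise (fun a b => l.idxOf a < l.idxOf b) := by
  intro l
  induction l with
  | nil => intro _; simp
  | cons x t ih =>
    intro hnd
    rw [List.nodup_cons] at hnd
    rw [List.pairwise_cons]
    constructor
    · intro b hb
      have hbx : ¬ (x == b) = true := by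
        simp only [beq_iff_eq]
        rintro rfl; exact hnd.1 hb
      rw [List.idxOf_cons, List.idxOf_cons]
      simp [hbx]
    · refine (ih hnd.2).imp_of_mem (fun {a b} ha hb hab => ?_)
      have hxa : ¬ (x == a) = true := by
        simp only [beq_iff_eq]; rintro rfl; exact hnd.1 ha
      have hxb : ¬ (x == b) = true := by
        simp only [beq_iff_eq]; rintro rfl; exact hnd.1 hb
      rw [List.idxOf_cons, List.idxOf_cons]
      simp [hxa, hxb]
      omega

theorem pvLt_lex (u v : List Int) : (@LT.lt _ List.instLT u v) ↔ List.Lex (· < ·) u v := by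
  show List.lt u v ↔ _
  exact List.lt_iff_lex_lt u v

theorem pvLt_mathlib (u v : List Int) :
    (@LT.lt _ List.instLT u v) ↔ (@LT.lt _ (inferInstance : LinearOrder (List Int)).toLT u v) := by
  rw [pvLt_lex]

theorem pvLt_trans {u v w : List Int} (h1 : @LT.lt _ List.instLT u v) (h2 : @LT.lt _ List.instLT v w) :
    @LT.lt _ List.instLT u w := by
  rw [pvLt_mathlib] at *
  exact lt_trans h1 h2

theorem pvLt_tri (u v : List Int) (h : ¬ @LT.lt _ List.instLT v u) :
    @LT.lt _ List.instLT u v ∨ u = v := by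
  rw [pvLt_mathlib] at *
  rcases lt_trichotomy u v with h1 | h1 | h1
  · exact Or.inl h1
  · exact Or.inr h1
  · exact absurd h1 h

theorem pvLt_asymm (u v : List Int) (h : @LT.lt _ List.instLT u v) : ¬ @LT.lt _ List.instLT v u := by
  rw [pvLt_mathlib] at *
  exact lt_asymm h

theorem pvLt_irrefl (u : List Int) (h : @LT.lt _ List.instLT u u) : False := pvLt_asymm u u h h

theorem pvCrossKey (a b : Int × String) (h : a.1 < b.1) :
    (fun p : Int × String => (6 - p.1) :: pvBStrength p.2.toList) b <
    (fun p : Int × String => (6 - p.1) :: pvBStrength p.2.toList) a := by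
  simp only
  rw [List.cons_lt_cons_iff]
  exact Or.inl (by omega)

theorem pvMain (ks : List String) (hnd : ks.Nodup) :
    (PySem.List.sorted (ks.filterMap (fun h => (pvBTypeIndex h.toList).map (fun t => (t, h))))
      (fun p => (6 - p.1) :: pvBStrength p.2.toList) true).map (fun p => p.2)
    = pvASortHands (ks.filter (fun h => pvBTypeIndex h.toList == some 0)) ++
      pvASortHands (ks.filter (fun h => pvBTypeIndex h.toList == some 1)) ++
      pvASortHands (ks.filter (fun h => pvBTypeIndex h.toList == some 2)) ++
      pvASortHands (ks.filter (fun h => pvBTypeIndex h.toList == some 3)) ++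
      pvASortHands (ks.filter (fun h => pvBTypeIndex h.toList == some 4)) ++
      pvASortHands (ks.filter (fun h => pvBTypeIndex h.toList == some 5)) ++
      pvASortHands (ks.filter (fun h => pvBTypeIndex h.toList == some 6)) := by
  set Kf : Int × String → List Int := fun p => (6 - p.1) :: pvBStrength p.2.toList with hKf
  set matched : List (Int × String) :=
    ks.filterMap (fun h => (pvBTypeIndex h.toList).map (fun t => (t, h))) with hmdef
  have hmnd : matched.Nodup := by
    refine List.Nodup.filterMap ?_ hnd
    intro a a' b hb hb'
    simp only [Option.mem_def, Option.map_eq_some_iff] at hb hb'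
    obtain ⟨t, _, rfl⟩ := hb
    obtain ⟨t', _, h2⟩ := hb'
    exact (congrArg Prod.snd h2).symm
  set P : Int × String → Int × String → Prop := fun p q => matched.idxOf p < matched.idxOf q with hPdef
  set R : Int × String → Int × String → Prop :=
    fun p q => Kf q < Kf p ∨ (Kf p = Kf q ∧ P p q) with hRdef
  have hP : matched.Pairwise P := by rw [hPdef]; exact pvPairwise_idxOf matched hmnd
  set M : Int → List (Int × String) := fun i => matched.filter (fun p => p.1 == i) with hMdef
  set T : Int → List (Int × String) := fun i => PySem.List.sorted (M i) Kf true with hTdef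
  have hMP : ∀ i, (M i).Pairwise P := fun i => List.Pairwise.sublist List.filter_sublist hP
  have hTpw : ∀ i, (T i).Pairwise R := by
    intro i
    rw [hRdef, hTdef]
    exact pvSorted_rev_stable pvLt_trans pvLt_tri Kf P (M i) (hMP i)
  have hfst : ∀ (i : Int) (p : Int × String), p ∈ T i → p.1 = i := by
    intro i p hp
    rw [hTdef] at hp
    have := (PySem.List.mem_sorted _ _ _ _).mp hp
    rw [hMdef] at this
    simpa using (List.mem_filter.mp this).2
  have hms : (PySem.List.sorted matched Kf true).Pairwise R := by
    rw [hRdef]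
    exact pvSorted_rev_stable pvLt_trans pvLt_tri Kf P matched hP
  have hbound : ∀ p ∈ matched, 0 ≤ p.1 ∧ p.1 < 7 := by
    intro p hp
    rw [hmdef] at hp
    rcases List.mem_filterMap.mp hp with ⟨h, _, hsome⟩
    rcases Option.map_eq_some_iff.mp hsome with ⟨t, ht, rfl⟩
    exact pvCls_bound _ _ ht
  have happ : ∀ (l1 l2 : List (Int × String)), l1.Pairwise R → l2.Pairwise R →
      (∀ a ∈ l1, ∀ b ∈ l2, R a b) → (l1 ++ l2).Pairwise R :=
    fun l1 l2 h1 h2 hc => List.pairwise_append.mpr ⟨h1, h2, hc⟩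
  have hcross : ∀ (i j : Int), i < j → ∀ a ∈ T i, ∀ b ∈ T j, R a b := by
    intro i j hij a ha b hb
    exact Or.inl (pvCrossKey a b (by rw [hfst i a ha, hfst j b hb]; exact hij))
  have hc01 := happ _ _ (hTpw 0) (hTpw 1) (hcross 0 1 (by norm_num))
  have hmem2 : ∀ (p : Int × String), p ∈ T 0 ++ T 1 → p.1 = 0 ∨ p.1 = 1 := by
    intro p hp; rcases List.mem_append.mp hp with h | h
    · exact Or.inl (hfst 0 p h)
    · exact Or.inr (hfst 1 p h)
  have hc02 := happ _ _ hc01 (hTpw 2) (by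
    intro a ha b hb
    refine Or.inl (pvCrossKey a b ?_)
    rw [hfst 2 b hb]; rcases hmem2 a ha with h | h <;> omega)
  have hmem3 : ∀ (p : Int × String), p ∈ T 0 ++ T 1 ++ T 2 → 0 ≤ p.1 ∧ p.1 ≤ 2 := by
    intro p hp; rcases List.mem_append.mp hp with h | h
    · rcases hmem2 p h with h' | h' <;> omega
    · have := hfst 2 p h; omega
  have hc03 := happ _ _ hc02 (hTpw 3) (by
    intro a ha b hb
    refine Or.inl (pvCrossKey a b ?_)
    rw [hfst 3 b hb]; have := hmem3 a ha; omega)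
  have hmem4 : ∀ (p : Int × String), p ∈ T 0 ++ T 1 ++ T 2 ++ T 3 → 0 ≤ p.1 ∧ p.1 ≤ 3 := by
    intro p hp; rcases List.mem_append.mp hp with h | h
    · have := hmem3 p h; omega
    · have := hfst 3 p h; omega
  have hc04 := happ _ _ hc03 (hTpw 4) (by
    intro a ha b hb
    refine Or.inl (pvCrossKey a b ?_)
    rw [hfst 4 b hb]; have := hmem4 a ha; omega)
  have hmem5 : ∀ (p : Int × String), p ∈ T 0 ++ T 1 ++ T 2 ++ T 3 ++ T 4 → 0 ≤ p.1 ∧ p.1 ≤ 4 := by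
    intro p hp; rcases List.mem_append.mp hp with h | h
    · have := hmem4 p h; omega
    · have := hfst 4 p h; omega
  have hc05 := happ _ _ hc04 (hTpw 5) (by
    intro a ha b hb
    refine Or.inl (pvCrossKey a b ?_)
    rw [hfst 5 b hb]; have := hmem5 a ha; omega)
  have hmem6 : ∀ (p : Int × String), p ∈ T 0 ++ T 1 ++ T 2 ++ T 3 ++ T 4 ++ T 5 → 0 ≤ p.1 ∧ p.1 ≤ 5 := by
    intro p hp; rcases List.mem_append.mp hp with h | h
    · have := hmem5 p h; omega
    · have := hfst 5 p h; omega
  have hc06 := happ _ _ hc05 (hTpw 6) (by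
    intro a ha b hb
    refine Or.inl (pvCrossKey a b ?_)
    rw [hfst 6 b hb]; have := hmem6 a ha; omega)
  have hTperm : (T 0 ++ T 1 ++ T 2 ++ T 3 ++ T 4 ++ T 5 ++ T 6).Perm matched := by
    have hp : ∀ i, (T i).Perm (M i) := fun i => PySem.List.sorted_perm _ _ _
    have h1 : (T 0 ++ T 1 ++ T 2 ++ T 3 ++ T 4 ++ T 5 ++ T 6).Perm
        (M 0 ++ M 1 ++ M 2 ++ M 3 ++ M 4 ++ M 5 ++ M 6) :=
      ((((((hp 0).append (hp 1)).append (hp 2)).append (hp 3)).append (hp 4)).append (hp 5)).append (hp 6)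
    exact h1.trans (pvPerm_parts matched hbound)
  have hanti : ∀ (a b : Int × String), a ∈ PySem.List.sorted matched Kf true →
      b ∈ T 0 ++ T 1 ++ T 2 ++ T 3 ++ T 4 ++ T 5 ++ T 6 → R a b → R b a → a = b := by
    intro a b _ _ hab hba
    rw [hRdef] at hab hba
    rcases hab with h1 | ⟨he1, hp1⟩ <;> rcases hba with h2 | ⟨he2, hp2⟩
    · exact absurd h2 (pvLt_asymm _ _ h1)
    · exact absurd h1 (fun hh => pvLt_irrefl _ (he2 ▸ hh))
    · exact absurd h2 (fun hh => pvLt_irrefl _ (he1 ▸ hh))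
    · rw [hPdef] at hp1 hp2; omega
  have hEq : PySem.List.sorted matched Kf true = T 0 ++ T 1 ++ T 2 ++ T 3 ++ T 4 ++ T 5 ++ T 6 :=
    List.eq_of_perm_of_sorted hanti hms hc06
      ((PySem.List.sorted_perm matched Kf true).trans hTperm.symm)
  rw [hEq]
  simp only [List.map_append]
  have hbucket : ∀ (i : Int), (T i).map (fun p => p.2) =
      pvASortHands (ks.filter (fun h => pvBTypeIndex h.toList == some i)) := by
    intro i
    rw [hTdef]
    simp only
    rw [hMdef]
    simp only
    rw [hmdef, pvMatched_filter i ks, pvSorted_map, List.map_map]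
    have hid : ((fun p : Int × String => p.2) ∘ (fun h : String => (i, h))) = id := rfl
    rw [hid, List.map_id]
    unfold pvASortHands
    refine pvSorted_congr _ _ _ (fun a _ b _ => ?_)
    rw [hKf]
    simp only
    rw [pvStrength_eq, pvStrength_eq, List.cons_lt_cons_iff]
    constructor
    · rintro (h | ⟨_, h⟩)
      · exact absurd h (lt_irrefl _)
      · exact h
    · intro h; exact Or.inr ⟨rfl, h⟩
  rw [hbucket 0, hbucket 1, hbucket 2, hbucket 3, hbucket 4, hbucket 5, hbucket 6]

theorem pvScore_fold0 (d : PySem.Dict String Int) (L : List String) (r s : Int) :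
    (L.foldl (fun st2 card => (st2.1 - 1, st2.2 + d.getD card 0 * st2.1)) (r, s)).2 =
    s + ((PySem.List.enumerate L 0).map (fun q => d.getD q.2 0 * (r - q.1))).sum := by
  rw [pvScore_fold d L r s 0]
  simp only
  congr 1
  refine congrArg _ (List.map_congr_left (fun q _ => ?_))
  ring


-- ===== VERDICT (by name: the statement is the Claim_ definition above) =====
theorem exercise_1_spec : Claim_equal_exercise_1 := by
  unfold Claim_equal_exercise_1
  intro pairs _ _
  unfold Spec_exercise_1
  simp only [exercise_1, exercise_1_alt]
  rw [pvLoop_mk]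
  have hfc : ∀ (i : Int) (hs : List String),
      hs.filter (fun h => pvClsA (pvAFindCombinations h.toList) == some i) =
      hs.filter (fun h => pvBTypeIndex h.toList == some i) :=
    fun i hs => List.filter_congr (fun x _ => by rw [pvCls_eq])
  simp only [hfc, List.nil_append]
  simp only [pvACountScore, pvAMkRules, List.foldl_cons, List.foldl_nil]
  rw [← List.foldl_append, ← List.foldl_append, ← List.foldl_append, ← List.foldl_append,
    ← List.foldl_append, ← List.foldl_append]
  rw [pvScore_fold0]
  simp only [← List.append_assoc]
  rw [← pvMain (PySem.Dict.ofList pairs).keys (PySem.Dict.nodup_keys_ofList pairs)]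
  rw [pvEnum_map]
  simp [List.map_map, Function.comp_def]
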